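-- pv_equiv track=rewrite | github.com/CemKarakale/Vetrina | ai-service/agents/visualization_agent.py | _first_matching_key
-- ===== SOURCE A (Python) =====
-- def _key_matches(key: str, priority: str) -> bool:
--     lower_key = key.lower()
--     if priority in {"ay"}:
--         return lower_key == priority or lower_key.endswith("_ay") or lower_key.startswith("ay_")
--     return priority in lower_key
--
-- def _first_matching_key(keys: list[str], priorities: list[str], exclude: str | None = None) -> str | None:
--     for priority in priorities:
--         for key in keys:
--             if key == exclude:
--                 continue
--             if _key_matches(key, priority):
--                 return key
--     return None
-- ===== SOURCE B (Python) =====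
-- def _key_matches(key: str, priority: str) -> bool:
--     lower_key = key.lower()
--     if priority in {"ay"}:
--         return lower_key == priority or lower_key.endswith("_ay") or lower_key.startswith("ay_")
--     return priority in lower_key
--
-- def _first_matching_key(keys: list[str], priorities: list[str], exclude: str | None = None) -> str | None:
--     best = None  # (rank, pos, key)
--     for pos, key in enumerate(keys):
--         if key == exclude:
--             continue
--         rank = next((r for r, p in enumerate(priorities) if _key_matches(key, p)), None)
--         if rank is None:
--             continue
--         if best is None or (rank, pos) < (best[0], best[1]):
--             best = (rank, pos, key)
--     return None if best is None else best[2]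
-- ===== Notes on version B (the rewrite author's own statement) =====
-- stated objective: alternative
-- what changed: Replaced A's early-return nested scan (priorities outer, keys inner) by a single pass over the keys that computes each key's first-matching-priority rank and returns the key minimizing (rank, position).
import Mathlib
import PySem

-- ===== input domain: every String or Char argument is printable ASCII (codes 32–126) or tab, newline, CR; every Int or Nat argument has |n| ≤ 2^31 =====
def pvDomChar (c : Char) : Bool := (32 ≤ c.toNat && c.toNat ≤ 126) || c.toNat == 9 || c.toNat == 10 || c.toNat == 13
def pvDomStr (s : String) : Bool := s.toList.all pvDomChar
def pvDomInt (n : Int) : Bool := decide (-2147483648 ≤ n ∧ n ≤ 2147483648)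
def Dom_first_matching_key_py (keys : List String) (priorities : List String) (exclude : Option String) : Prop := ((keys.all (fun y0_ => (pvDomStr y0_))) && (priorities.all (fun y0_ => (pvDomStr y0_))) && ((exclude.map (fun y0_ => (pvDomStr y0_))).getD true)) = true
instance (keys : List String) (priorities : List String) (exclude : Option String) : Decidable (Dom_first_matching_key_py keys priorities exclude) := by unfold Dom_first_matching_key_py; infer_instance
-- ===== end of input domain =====

-- B replaces A's early-return nested scan (priorities outer, keys inner) by a single pass over the
-- keys that computes each key's priority rank and keeps the argmin of (rank, position); objective:
-- alternative decomposition, same result.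

-- ===== PORT A =====
-- _key_matches, shared verbatim by both Pythons
def keyMatches (key : String) (priority : String) : Bool :=
  let lowerKey := PySem.Str.lower key
  if priority = "ay" then
    lowerKey == priority || PySem.Str.endswith lowerKey "_ay" || PySem.Str.startswith lowerKey "ay_"
  else
    PySem.Str.isIn priority lowerKey

-- inner 'for key in keys' loop of A
def findKeyA (priority : String) (exclude : Option String) : List String → Option String
  | [] => none
  | key :: rest =>
    if some key = exclude then findKeyA priority exclude rest
    else if keyMatches key priority then some key
    else findKeyA priority exclude rest

-- outer 'for priority in priorities' loop of A
def goA (keys : List String) (exclude : Option String) : List String → Option String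
  | [] => none
  | p :: ps =>
    match findKeyA p exclude keys with
    | some k => some k
    | none => goA keys exclude ps

def first_matching_key_py (keys : List String) (priorities : List String) (exclude : Option String) : Option String :=
  goA keys exclude priorities

-- ===== PORT B =====
-- rank = next((r for r, p in enumerate(priorities) if _key_matches(key, p)), None)
def rankOf (key : String) : List String → Nat → Option Nat
  | [], _ => none
  | p :: ps, r => if keyMatches key p then some r else rankOf key ps (r + 1)

-- one iteration of B's 'for pos, key in enumerate(keys)' loop body
def bStep (priorities : List String) (exclude : Option String)
    (best : Option (Nat × Int × String)) (pk : Int × String) : Option (Nat × Int × String) :=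
  if some pk.2 = exclude then best
  else
    match rankOf pk.2 priorities 0 with
    | none => best
    | some rank =>
      match best with
      | none => some (rank, pk.1, pk.2)
      | some b =>
        if rank < b.1 ∨ (rank = b.1 ∧ pk.1 < b.2.1) then some (rank, pk.1, pk.2) else best

def first_matching_key_py_alt (keys : List String) (priorities : List String) (exclude : Option String) : Option String :=
  match (PySem.List.enumerate keys 0).foldl (bStep priorities exclude) none with
  | none => none
  | some b => some b.2.2

-- ===== PRECONDITION & SPEC =====
def Spec_first_matching_key_py (keys : List String) (priorities : List String) (exclude : Option String) (out : Option String) : Prop := out = first_matching_key_py_alt keys priorities exclude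
instance (keys : List String) (priorities : List String) (exclude : Option String) (out : Option String) : Decidable (Spec_first_matching_key_py keys priorities exclude out) := by unfold Spec_first_matching_key_py; infer_instance

-- ===== CLAIM (what is proved, stated in full; the proofs are below) =====
def Claim_equal_first_matching_key_py : Prop := ∀ (keys : List String) (priorities : List String) (exclude : Option String), Dom_first_matching_key_py keys priorities exclude → Spec_first_matching_key_py keys priorities exclude (first_matching_key_py keys priorities exclude)

-- ===== LEMMAS AND PROOFS =====

-- the comparison/update step of B's loop, abstracted away from exclusion and rank computation
def pvStep (best : Option (Nat × Int × String)) (c : Nat × Int × String) : Option (Nat × Int × String) :=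
  match best with
  | none => some c
  | some b => if c.1 < b.1 ∨ (c.1 = b.1 ∧ c.2.1 < b.2.1) then some c else best

-- the candidates B's loop actually updates on: (rank, position, key) for non-excluded matching keys
def pvCands (priorities : List String) (exclude : Option String) (l : List (Int × String)) : List (Nat × Int × String) :=
  l.filterMap (fun pk =>
    if some pk.2 = exclude then none
    else (rankOf pk.2 priorities 0).map (fun r => (r, pk.1, pk.2)))

-- A's nested loops written over an enumerated key list
def pvAfold (exclude : Option String) (l : List (Int × String)) : List String → Option String
  | [] => none
  | p :: ps =>
    match l.find? (fun pk => !(some pk.2 = exclude : Bool) && keyMatches pk.2 p) with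
    | some pk => some pk.2
    | none => pvAfold exclude l ps

theorem pv_fold_eq (priorities : List String) (exclude : Option String) :
    ∀ (l : List (Int × String)) (best : Option (Nat × Int × String)),
      l.foldl (bStep priorities exclude) best = (pvCands priorities exclude l).foldl pvStep best := by
  intro l
  induction l with
  | nil => intro best; rfl
  | cons pk rest ih =>
    intro best
    rw [List.foldl_cons, pvCands, List.filterMap_cons]
    by_cases hex : some pk.2 = exclude
    · rw [if_pos hex]
      have h1 : bStep priorities exclude best pk = best := by simp [bStep, hex]
      rw [h1, ih, pvCands]
    · rw [if_neg hex]
      cases hr : rankOf pk.2 priorities 0 with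
      | none =>
        have h1 : bStep priorities exclude best pk = best := by simp [bStep, hex, hr]
        rw [h1, ih, pvCands]
        rfl
      | some r =>
        have h1 : bStep priorities exclude best pk = pvStep best (r, pk.1, pk.2) := by
          cases best with
          | none => simp [bStep, hex, hr, pvStep]
          | some b => simp [bStep, hex, hr, pvStep]
        rw [Option.map_some, List.foldl_cons, h1, ih, pvCands]

theorem rankOf_succ (key : String) : ∀ (ps : List String) (r : Nat),
    rankOf key ps (r + 1) = (rankOf key ps r).map (· + 1) := by
  intro ps
  induction ps with
  | nil => intro r; rfl
  | cons p ps ih =>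
    intro r
    by_cases h : keyMatches key p = true
    · simp [rankOf, h]
    · simp [rankOf, h, ih]

theorem pv_keep (e : Nat × Int × String) (he : e.1 = 0) :
    ∀ (c2 : List (Nat × Int × String)), (∀ y ∈ c2, e.2.1 < y.2.1) →
      c2.foldl pvStep (some e) = some e := by
  intro c2
  induction c2 with
  | nil => intro _; rfl
  | cons y c2 ih =>
    intro h
    have hy := h y (by simp)
    have hstep : pvStep (some e) y = some e := by
      simp only [pvStep]
      rw [if_neg]
      push Not
      constructor
      · omega
      · intro _; omega
    simp only [List.foldl_cons, hstep]
    exact ih (fun y hy => h y (by simp [hy]))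

theorem pv_reach (e : Nat × Int × String) (he : e.1 = 0)
    (c2 : List (Nat × Int × String)) (h2 : ∀ y ∈ c2, e.2.1 < y.2.1) :
    ∀ (c1 : List (Nat × Int × String)) (best : Option (Nat × Int × String)),
      (∀ x ∈ c1, x.1 ≠ 0) → (∀ bx, best = some bx → bx.1 ≠ 0) →
      (c1 ++ e :: c2).foldl pvStep best = some e := by
  intro c1
  induction c1 with
  | nil =>
    intro best _ hb
    have hstep : pvStep best e = some e := by
      cases best with
      | none => rfl
      | some bx =>
        have : bx.1 ≠ 0 := hb bx rfl
        simp only [pvStep]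
        rw [if_pos]
        left; omega
    simp only [List.nil_append, List.foldl_cons, hstep]
    exact pv_keep e he c2 h2
  | cons x c1 ih =>
    intro best hx hb
    simp only [List.cons_append, List.foldl_cons]
    apply ih
    · exact fun z hz => hx z (by simp [hz])
    · intro bx hbx
      cases best with
      | none =>
        simp only [pvStep] at hbx
        cases hbx
        exact hx x (by simp)
      | some b =>
        simp only [pvStep] at hbx
        split at hbx
        · cases hbx; exact hx x (by simp)
        · cases hbx; exact hb bx rfl

-- shifting all ranks by one commutes with the fold
theorem pv_shift : ∀ (c : List (Nat × Int × String)) (b : Option (Nat × Int × String)),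
    (c.map (fun x => (x.1 + 1, x.2))).foldl pvStep (b.map (fun x => (x.1 + 1, x.2))) =
      (c.foldl pvStep b).map (fun x => (x.1 + 1, x.2)) := by
  intro c
  induction c with
  | nil => intro b; rfl
  | cons x c ih =>
    intro b
    have hstep : pvStep (b.map (fun x => (x.1 + 1, x.2))) (x.1 + 1, x.2) =
        (pvStep b x).map (fun x => (x.1 + 1, x.2)) := by
      cases b with
      | none => rfl
      | some bb =>
        simp only [pvStep, Option.map_some]
        by_cases h : x.1 < bb.1 ∨ (x.1 = bb.1 ∧ x.2.1 < bb.2.1)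
        · rw [if_pos h, if_pos (show x.1 + 1 < bb.1 + 1 ∨ (x.1 + 1 = bb.1 + 1 ∧ x.2.1 < bb.2.1) by omega)]
          rfl
        · rw [if_neg h, if_neg (show ¬(x.1 + 1 < bb.1 + 1 ∨ (x.1 + 1 = bb.1 + 1 ∧ x.2.1 < bb.2.1)) by omega)]
          rfl
    simp only [List.map_cons, List.foldl_cons, hstep, ih]

theorem pv_filterMap_map {α β γ : Type} (f : α → Option β) (g : α → Option γ) (h : γ → β) :
    ∀ (l : List α), (∀ a ∈ l, f a = (g a).map h) → l.filterMap f = (l.filterMap g).map h := by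
  intro l
  induction l with
  | nil => intro _; rfl
  | cons a l ih =>
    intro hl
    have ha := hl a (by simp)
    cases hg : g a with
    | none => simp only [List.filterMap_cons, ha, hg, Option.map_none]; exact ih (fun a ha => hl a (by simp [ha]))
    | some c => simp only [List.filterMap_cons, ha, hg, Option.map_some, List.map_cons]
                exact congrArg _ (ih (fun a ha => hl a (by simp [ha])))

-- main bridge: B's fold over candidates computes A's nested-loop result
theorem pv_main (exclude : Option String) : ∀ (ps : List String) (l : List (Int × String)),
    l.Pairwise (fun p q => p.1 < q.1) →
    ((pvCands ps exclude l).foldl pvStep none).map (fun b => b.2.2) = pvAfold exclude l ps := by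
  intro ps
  induction ps with
  | nil =>
    intro l _
    have : pvCands [] exclude l = [] := by
      simp [pvCands, rankOf]
    simp [this, pvAfold]
  | cons p ps ih =>
    intro l hpw
    by_cases hex : ∃ pk ∈ l, (!(some pk.2 = exclude : Bool) && keyMatches pk.2 p) = true
    · -- some key matches the top priority: A returns the first such key, B's argmin has rank 0 there
      obtain ⟨pk0, hmem, hpred⟩ := hex
      have hsome : (l.find? (fun pk => !(some pk.2 = exclude : Bool) && keyMatches pk.2 p)).isSome := by
        rw [List.find?_isSome]
        exact ⟨pk0, hmem, hpred⟩
      obtain ⟨x, hx⟩ := Option.isSome_iff_exists.mp hsome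
      obtain ⟨hpx, l1, l2, hl, hl1⟩ := List.find?_eq_some_iff_append.mp hx
      have hxok : ¬ (some x.2 = exclude) := by
        simp only [Bool.and_eq_true, Bool.not_eq_eq_eq_not, Bool.not_true, decide_eq_false_iff_not] at hpx
        exact hpx.1
      have hxm : keyMatches x.2 p = true := by
        simp only [Bool.and_eq_true] at hpx
        exact hpx.2
      have hcand : pvCands (p :: ps) exclude l =
          pvCands (p :: ps) exclude l1 ++ (0, x.1, x.2) :: pvCands (p :: ps) exclude l2 := by
        rw [hl, pvCands, List.filterMap_append, List.filterMap_cons]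
        simp [hxok, rankOf, hxm, pvCands]
      rw [hcand]
      rw [pv_reach (0, x.1, x.2) rfl]
      · simp [pvAfold, hx]
      · -- every candidate from l2 sits at a later position
        intro y hy
        simp only [pvCands, List.mem_filterMap] at hy
        obtain ⟨pk, hpk, hval⟩ := hy
        have hlt : x.1 < pk.1 := by
          rw [hl] at hpw
          have := (List.pairwise_append.mp hpw).2.1
          exact (List.pairwise_cons.mp this).1 pk hpk
        split at hval
        · cases hval
        · cases h : rankOf pk.2 (p :: ps) 0 with
          | none => rw [h] at hval; cases hval
          | some r => rw [h] at hval; cases hval; exact hlt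
      · -- every candidate from l1 has nonzero rank (its key misses the top priority)
        intro z hz
        simp only [pvCands, List.mem_filterMap] at hz
        obtain ⟨pk, hpk, hval⟩ := hz
        by_cases hz2 : some pk.2 = exclude
        · rw [if_pos hz2] at hval; cases hval
        · rw [if_neg hz2] at hval
          have hnm : keyMatches pk.2 p = false := by
            have h1 := hl1 pk hpk
            revert h1
            cases hkm : keyMatches pk.2 p <;> simp [hz2]
          have hrw : rankOf pk.2 (p :: ps) 0 = (rankOf pk.2 ps 0).map (· + 1) := by
            simp only [rankOf, hnm, Bool.false_eq_true, if_false]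
            exact rankOf_succ pk.2 ps 0
          rw [hrw] at hval
          cases h : rankOf pk.2 ps 0 with
          | none => rw [h] at hval; cases hval
          | some r =>
            rw [h] at hval
            simp only [Option.map_some] at hval
            cases hval
            simp
      · intro bx h; cases h
    · -- no key matches the top priority: all ranks shift by one, the argmin is unchanged
      push Not at hex
      have hfind : l.find? (fun pk => !(some pk.2 = exclude : Bool) && keyMatches pk.2 p) = none := by
        rw [List.find?_eq_none]
        intro pk hpk
        have h1 := hex pk hpk
        revert h1
        cases (!(some pk.2 = exclude : Bool) && keyMatches pk.2 p) <;> simp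
      have hcand : pvCands (p :: ps) exclude l =
          (pvCands ps exclude l).map (fun x => (x.1 + 1, x.2)) := by
        apply pv_filterMap_map
        intro pk hpk
        by_cases hz : some pk.2 = exclude
        · simp [hz]
        · have hnm : keyMatches pk.2 p = false := by
            have h1 := hex pk hpk
            revert h1
            cases hkm : keyMatches pk.2 p <;> simp [hz]
          rw [if_neg hz, if_neg hz]
          simp only [rankOf, hnm, Bool.false_eq_true, if_false, rankOf_succ, Option.map_map]
          rfl
      rw [hcand]
      have := pv_shift (pvCands ps exclude l) none
      simp only [Option.map_none] at this
      rw [this]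
      simp only [Option.map_map]
      have : ((fun (x : Nat × Int × String) => x.2.2) ∘ fun x => (x.1 + 1, x.2)) =
          fun (b : Nat × Int × String) => b.2.2 := rfl
      rw [this, ih l hpw]
      simp [pvAfold, hfind]

-- A over the enumerated list equals A over the raw keys
theorem pv_findKeyA (p : String) (exclude : Option String) :
    ∀ (keys : List String) (s : Int),
      ((PySem.List.enumerate keys s).find? (fun pk => !(some pk.2 = exclude : Bool) && keyMatches pk.2 p)).map (·.2)
        = findKeyA p exclude keys := by
  intro keys
  induction keys with
  | nil => intro s; rfl
  | cons k rest ih =>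
    intro s
    rw [PySem.List.enumerate_cons]
    by_cases hz : some k = exclude
    · simp [findKeyA, hz, ih]
    · by_cases hm : keyMatches k p = true
      · simp [findKeyA, hz, hm]
      · simp [findKeyA, hz, hm, ih]

theorem pv_goA (keys : List String) (exclude : Option String) : ∀ (ps : List String),
    goA keys exclude ps = pvAfold exclude (PySem.List.enumerate keys 0) ps := by
  intro ps
  induction ps with
  | nil => rfl
  | cons p ps ih =>
    simp only [goA, pvAfold]
    rw [← pv_findKeyA p exclude keys 0]
    cases h : (PySem.List.enumerate keys 0).find? (fun pk => !(some pk.2 = exclude : Bool) && keyMatches pk.2 p) with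
    | none => simpa [h] using ih
    | some x => simp

-- ===== VERDICT (by name: the statement is the Claim_ definition above) =====
theorem first_matching_key_py_spec : Claim_equal_first_matching_key_py := by
  intro keys priorities exclude _
  unfold Spec_first_matching_key_py first_matching_key_py first_matching_key_py_alt
  rw [pv_fold_eq, pv_goA]
  rw [← pv_main exclude priorities (PySem.List.enumerate keys 0) (PySem.List.pairwise_lt_enumerate keys 0)]
  cases (pvCands priorities exclude (PySem.List.enumerate keys 0)).foldl pvStep none with
  | none => rfl
  | some b => rfl
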